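-- pv_equiv track=rewrite | github.com/KemalAltwlkany/preference-articulation | test.py | generate_neighborhood
-- ===== SOURCE A (Python) =====
-- def generate_neighborhood(x=[], neighborhood=[], current_span=[], delta=1):
--     if len(x) == 1:
--         span1 = list(current_span)
--         span1.append(x[0]-delta)
--         span2 = list(current_span)
--         span2.append(x[0])
--         span3 = list(current_span)
--         span3.append(x[0]+delta)
--         neighborhood.append(span1)
--         neighborhood.append(span2)
--         neighborhood.append(span3)
--         return neighborhood
--     else:
--         new_span = list(current_span)
--         new_span.append(x[0])
--         neighborhood = generate_neighborhood(x=x[1:], neighborhood=neighborhood, current_span=new_span)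
--         new_span[-1] = new_span[-1] - delta
--         neighborhood = generate_neighborhood(x=x[1:], neighborhood=neighborhood, current_span=new_span)
--         new_span[-1] = new_span[-1] + 2*delta
--         neighborhood = generate_neighborhood(x=x[1:], neighborhood=neighborhood, current_span=new_span)
--     return neighborhood
-- ===== SOURCE B (Python) =====
-- def generate_neighborhood(x=[], neighborhood=[], current_span=[], delta=1):
--     # Build per-dimension offset choices, then take their cartesian product.
--     # Note A passes no delta to its recursive calls, so only the first
--     # dimension uses `delta`; deeper dimensions use the default step 1.
--     choices = []
--     for v in x[:-1]:
--         choices.append([v, v - delta, v + delta])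
--         delta = 1
--     if x:
--         v = x[-1]
--         choices.append([v - delta, v, v + delta])
--     combos = [[]]
--     for ch in choices:
--         combos = [c + [o] for c in combos for o in ch]
--     for c in combos:
--         neighborhood.append(current_span + c)
--     return neighborhood
-- ===== Notes on version B (the rewrite author's own statement) =====
-- stated objective: alternative
-- what changed: Replaced A's triple recursive self-call per dimension with an iterative build: a list of per-dimension offset choices followed by a cartesian-product fold, then one append pass; A mutates `neighborhood` in place and B performs the same appends, the proof is about the return value.
import Mathlib
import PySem

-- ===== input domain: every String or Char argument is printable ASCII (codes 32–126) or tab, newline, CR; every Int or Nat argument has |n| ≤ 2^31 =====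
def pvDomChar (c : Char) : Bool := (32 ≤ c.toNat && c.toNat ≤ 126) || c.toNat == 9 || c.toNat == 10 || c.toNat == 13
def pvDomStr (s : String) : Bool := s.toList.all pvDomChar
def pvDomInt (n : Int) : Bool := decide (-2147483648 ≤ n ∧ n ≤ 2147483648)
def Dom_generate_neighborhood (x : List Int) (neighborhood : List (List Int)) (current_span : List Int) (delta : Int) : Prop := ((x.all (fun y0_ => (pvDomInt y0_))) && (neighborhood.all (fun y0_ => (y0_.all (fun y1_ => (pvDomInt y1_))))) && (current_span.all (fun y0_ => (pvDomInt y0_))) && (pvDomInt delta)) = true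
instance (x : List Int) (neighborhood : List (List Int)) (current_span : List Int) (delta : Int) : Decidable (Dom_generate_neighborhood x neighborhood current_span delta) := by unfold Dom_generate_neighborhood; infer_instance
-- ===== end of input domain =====

-- B replaces A's triple recursive self-call per dimension with an iterative choice-list +
-- cartesian-product construction (alternative decomposition, same cost). A (and B) also mutate
-- the `neighborhood` argument in place in Python; the equivalence proved here is about the
-- return value.
-- ===== PORT A =====
def generate_neighborhood : (x : List Int) → (neighborhood : List (List Int)) → (current_span : List Int) → (delta : Int) → List (List Int)
  | [], neighborhood, _, _ => neighborhood  -- unreachable under Pre_: Python raises IndexError (x[0]) here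
  | x0 :: rest, neighborhood, current_span, delta =>
    if rest = [] then
      -- len(x) == 1 branch
      neighborhood ++ [current_span ++ [x0 - delta], current_span ++ [x0], current_span ++ [x0 + delta]]
    else
      -- recursive calls leave delta at its default 1, exactly as A omits the delta keyword
      let new_span := current_span ++ [x0]
      let n1 := generate_neighborhood rest neighborhood new_span 1
      let new_span2 := current_span ++ [x0 - delta]        -- new_span[-1] -= delta
      let n2 := generate_neighborhood rest n1 new_span2 1
      let new_span3 := current_span ++ [x0 + delta]        -- new_span[-1] += 2*delta
      generate_neighborhood rest n2 new_span3 1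

-- ===== PORT B =====
-- for v in x[:-1]: choices.append([v, v - delta, v + delta]); delta = 1
def gnChoicesLoop (xs : List Int) (delta : Int) (choices : List (List Int)) : List (List Int) × Int :=
  xs.foldl (fun (st : List (List Int) × Int) v => (st.1 ++ [[v, v - st.2, v + st.2]], 1)) (choices, delta)

-- if x: v = x[-1]; choices.append([v - delta, v, v + delta])
def gnChoicesOf (x : List Int) (delta : Int) : List (List Int) :=
  let st := gnChoicesLoop x.dropLast delta []
  match x.getLast? with
  | none => st.1
  | some v => st.1 ++ [[v - st.2, v, v + st.2]]

def generate_neighborhood_alt (x : List Int) (neighborhood : List (List Int)) (current_span : List Int) (delta : Int) : List (List Int) :=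
  let choices := gnChoicesOf x delta
  let combos := choices.foldl (fun cs ch => cs.flatMap (fun c => ch.map (fun o => c ++ [o]))) [[]]
  neighborhood ++ combos.map (fun c => current_span ++ c)

-- ===== PRECONDITION & SPEC =====
-- Pre_ excludes only empty x, on which Python A raises IndexError (x[0]).
def Pre_generate_neighborhood (x : List Int) (neighborhood : List (List Int)) (current_span : List Int) (delta : Int) : Prop := x ≠ []
instance (x : List Int) (neighborhood : List (List Int)) (current_span : List Int) (delta : Int) : Decidable (Pre_generate_neighborhood x neighborhood current_span delta) := by unfold Pre_generate_neighborhood; infer_instance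
def pvWitness_generate_neighborhood : List Int × List (List Int) × List Int × Int := ([2, -1], [[7]], [4], 2)

def Spec_generate_neighborhood (x : List Int) (neighborhood : List (List Int)) (current_span : List Int) (delta : Int) (out : List (List Int)) : Prop := out = generate_neighborhood_alt x neighborhood current_span delta
instance (x : List Int) (neighborhood : List (List Int)) (current_span : List Int) (delta : Int) (out : List (List Int)) : Decidable (Spec_generate_neighborhood x neighborhood current_span delta out) := by unfold Spec_generate_neighborhood; infer_instance

-- ===== CLAIM (what is proved, stated in full; the proofs are below) =====
def Claim_equal_generate_neighborhood : Prop := ∀ (x : List Int) (neighborhood : List (List Int)) (current_span : List Int) (delta : Int), Dom_generate_neighborhood x neighborhood current_span delta → Pre_generate_neighborhood x neighborhood current_span delta → Spec_generate_neighborhood x neighborhood current_span delta (generate_neighborhood x neighborhood current_span delta)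

-- ===== LEMMAS AND PROOFS =====

-- the recursive shape of B's choice list
def recChoices : List Int → Int → List (List Int)
  | [], _ => []
  | [v], d => [[v - d, v, v + d]]
  | v :: v' :: rest, d => [v, v - d, v + d] :: recChoices (v' :: rest) 1

def gnProd (chs : List (List Int)) : List (List Int) :=
  chs.foldl (fun cs ch => cs.flatMap (fun c => ch.map (fun o => c ++ [o]))) [[]]

theorem gnChoicesLoop_cons (v : Int) (xs : List Int) (d : Int) (acc : List (List Int)) :
    gnChoicesLoop (v :: xs) d acc = gnChoicesLoop xs 1 (acc ++ [[v, v - d, v + d]]) := rfl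

theorem gnChoicesLoop_acc (xs : List Int) (d : Int) (acc : List (List Int)) :
    gnChoicesLoop xs d acc = (acc ++ (gnChoicesLoop xs d []).1, (gnChoicesLoop xs d []).2) := by
  induction xs generalizing d acc with
  | nil => simp [gnChoicesLoop]
  | cons v xs ih =>
    rw [gnChoicesLoop_cons, gnChoicesLoop_cons, ih 1 (acc ++ [[v, v - d, v + d]]),
        ih 1 ([] ++ [[v, v - d, v + d]])]
    simp

theorem gnChoicesOf_eq (x : List Int) (d : Int) : gnChoicesOf x d = recChoices x d := by
  induction x generalizing d with
  | nil => rfl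
  | cons v xs ih =>
    cases xs with
    | nil => simp [gnChoicesOf, gnChoicesLoop, recChoices]
    | cons v' rest =>
      obtain ⟨w, hw⟩ : ∃ w, (v' :: rest).getLast? = some w := by
        cases h : (v' :: rest).getLast? with
        | none => simp [List.getLast?_eq_none_iff] at h
        | some w => exact ⟨w, rfl⟩
      have ih1 := ih (d := 1)
      simp only [gnChoicesOf, hw, List.getLast?_cons_cons,
        List.dropLast_cons_of_ne_nil (by simp : (v' :: rest : List Int) ≠ [])] at ih1 ⊢
      rw [show gnChoicesLoop (v :: (v' :: rest).dropLast) d []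
            = gnChoicesLoop ((v' :: rest).dropLast) 1 [[v, v - d, v + d]] from rfl,
          gnChoicesLoop_acc]
      simp only [recChoices, ← ih1]
      simp

theorem gnProd_foldl (chs : List (List Int)) (cs : List (List Int)) :
    chs.foldl (fun cs ch => cs.flatMap (fun c => ch.map (fun o => c ++ [o]))) cs
      = cs.flatMap (fun c => (gnProd chs).map (fun t => c ++ t)) := by
  induction chs generalizing cs with
  | nil => simp [gnProd]
  | cons ch chs ih =>
    simp only [gnProd, List.foldl_cons] at *
    rw [ih, ih (cs := [[]].flatMap (fun c => ch.map (fun o => c ++ [o])))]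
    simp [List.flatMap_assoc, List.flatMap_map, List.map_flatMap, List.map_map, List.append_assoc, Function.comp_def]

theorem gnProd_cons (ch : List Int) (chs : List (List Int)) :
    gnProd (ch :: chs) = ch.flatMap (fun o => (gnProd chs).map (fun t => o :: t)) := by
  simp only [gnProd, List.foldl_cons]
  rw [gnProd_foldl]
  simp [gnProd, List.flatMap_map]

theorem gn_cons_cons (v v' : Int) (rest : List Int) (nb : List (List Int)) (span : List Int) (d : Int) :
    generate_neighborhood (v :: v' :: rest) nb span d =
      generate_neighborhood (v' :: rest)
        (generate_neighborhood (v' :: rest)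
          (generate_neighborhood (v' :: rest) nb (span ++ [v]) 1) (span ++ [v - d]) 1)
        (span ++ [v + d]) 1 := by
  conv_lhs => rw [generate_neighborhood]
  rw [if_neg (by simp : ¬ (v' :: rest = []))]

theorem gn_closed (x : List Int) (h : x ≠ []) (nb : List (List Int)) (span : List Int) (d : Int) :
    generate_neighborhood x nb span d = nb ++ (gnProd (recChoices x d)).map (fun c => span ++ c) := by
  induction x generalizing nb span d with
  | nil => exact absurd rfl h
  | cons v xs ih =>
    cases xs with
    | nil => simp [generate_neighborhood, recChoices, gnProd]
    | cons v' rest =>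
      have hne : (v' :: rest : List Int) ≠ [] := by simp
      rw [gn_cons_cons, ih hne, ih hne, ih hne,
          show recChoices (v :: v' :: rest) d = [v, v - d, v + d] :: recChoices (v' :: rest) 1 from rfl,
          gnProd_cons]
      simp [List.append_assoc, Function.comp_def]

theorem alt_closed (x : List Int) (nb : List (List Int)) (span : List Int) (d : Int) :
    generate_neighborhood_alt x nb span d = nb ++ (gnProd (recChoices x d)).map (fun c => span ++ c) := by
  show nb ++ (gnProd (gnChoicesOf x d)).map (fun c => span ++ c)
      = nb ++ (gnProd (recChoices x d)).map (fun c => span ++ c)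
  rw [gnChoicesOf_eq]

-- ===== VERDICT (by name: the statement is the Claim_ definition above) =====
theorem generate_neighborhood_spec : Claim_equal_generate_neighborhood := by
  intro x nb span d _ hpre
  unfold Spec_generate_neighborhood
  rw [gn_closed x hpre nb span d, alt_closed]
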